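-- pv_equiv track=rewrite | github.com/JaredR6/Advent2019 | day04/problem.py | has_strict_double
-- ===== SOURCE A (Python) =====
-- def has_strict_double(s):
--   dub, strict = False, False
--   for i in range(len(s)-1):
--     if s[i] == s[i+1]:
--       strict = not dub
--       dub = True
--     else:
--       if strict:
--         return True
--       dub = False
--   return strict
-- ===== SOURCE B (Python) =====
-- from itertools import groupby
--
-- def has_strict_double(s):
--     return any(sum(1 for _ in g) == 2 for _, g in groupby(s))
-- ===== Notes on version B (the rewrite author's own statement) =====
-- stated objective: idiomatic
-- what changed: Replaced the flag-carrying adjacent-pair loop (dub/strict state with early return) by collapsing the string into maximal runs with itertools.groupby and checking for any run of length exactly 2.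
import Mathlib
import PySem

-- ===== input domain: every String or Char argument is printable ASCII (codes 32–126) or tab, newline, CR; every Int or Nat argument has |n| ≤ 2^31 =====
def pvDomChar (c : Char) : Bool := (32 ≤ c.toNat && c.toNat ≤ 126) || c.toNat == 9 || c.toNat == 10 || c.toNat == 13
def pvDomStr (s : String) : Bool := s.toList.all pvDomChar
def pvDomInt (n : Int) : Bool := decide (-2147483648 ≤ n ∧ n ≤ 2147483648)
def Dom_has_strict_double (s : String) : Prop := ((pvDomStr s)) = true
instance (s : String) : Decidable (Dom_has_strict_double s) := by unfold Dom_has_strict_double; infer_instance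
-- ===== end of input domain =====

-- B groups the string into maximal runs (itertools.groupby) and asks for a run of length
-- exactly 2, instead of A's dub/strict flags threaded over adjacent pairs; same cost, more idiomatic.

-- ===== PORT A =====
-- A's loop over i in range(len(s)-1), state (dub, strict), early return True on a mismatch with strict set.
def pvALoop : List Char → Bool → Bool → Bool
  | a :: b :: rest, dub, strict =>
    if a == b then pvALoop (b :: rest) true (!dub)
    else if strict then true
    else pvALoop (b :: rest) false strict
  | _, _, strict => strict

def has_strict_double (s : String) : Bool := pvALoop s.toList false false

-- ===== PORT B =====
-- maximal runs of equal adjacent characters with their lengths (what itertools.groupby yields)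
def pvRuns : List Char → List (Char × Nat)
  | [] => []
  | c :: rest =>
    match pvRuns rest with
    | [] => [(c, 1)]
    | (d, m) :: t => if c == d then (c, m + 1) :: t else (c, 1) :: (d, m) :: t

def has_strict_double_alt (s : String) : Bool :=
  (pvRuns s.toList).any (fun p => p.2 == 2)

-- ===== PRECONDITION & SPEC =====
def Spec_has_strict_double (s : String) (out : Bool) : Prop := out = has_strict_double_alt s
instance (s : String) (out : Bool) : Decidable (Spec_has_strict_double s out) := by unfold Spec_has_strict_double; infer_instance

-- ===== CLAIM (what is proved, stated in full; the proofs are below) =====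
def Claim_equal_has_strict_double : Prop := ∀ (s : String), Dom_has_strict_double s → Spec_has_strict_double s (has_strict_double s)

-- ===== LEMMAS AND PROOFS =====

-- add k to the count of the first run (k earlier copies of the leading character)
def pvBump (k : Nat) : List (Char × Nat) → List (Char × Nat)
  | [] => []
  | (c, m) :: t => (c, m + k) :: t

theorem pvRuns_head (d : Char) (r : List Char) :
    ∃ m t, pvRuns (d :: r) = (d, m) :: t := by
  cases h : pvRuns r with
  | nil => exact ⟨1, [], by simp [pvRuns, h]⟩
  | cons p t =>
    obtain ⟨e, m⟩ := p
    by_cases hde : d = e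
    · subst hde; exact ⟨m + 1, t, by simp [pvRuns, h]⟩
    · exact ⟨1, (e, m) :: t, by simp [pvRuns, h, hde]⟩

theorem pvALoop_runs (rest : List Char) : ∀ (c : Char) (n : Nat), 1 ≤ n →
    pvALoop (c :: rest) (decide (2 ≤ n)) (decide (n = 2)) =
      (pvBump (n - 1) (pvRuns (c :: rest))).any (fun p => p.2 == 2) := by
  induction rest with
  | nil =>
    intro c n hn
    have h1 : 1 + (n - 1) = n := by omega
    by_cases h2 : n = 2 <;> simp [pvALoop, pvRuns, pvBump, h1, h2]
  | cons d rest' ih =>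
    intro c n hn
    obtain ⟨m, t, hmt⟩ := pvRuns_head d rest'
    by_cases hcd : c = d
    · subst hcd
      have hL : pvALoop (c :: c :: rest') (decide (2 ≤ n)) (decide (n = 2)) =
          pvALoop (c :: rest') (decide (2 ≤ n + 1)) (decide (n + 1 = 2)) := by
        have hs : (!(decide (2 ≤ n))) = (decide (n + 1 = 2)) := by
          rcases Nat.lt_or_ge n 2 with h | h
          · interval_cases n; simp
          · simp [decide_eq_true (by omega : 2 ≤ n)]; omega
        simp [pvALoop, hs, decide_eq_true hn]
      rw [hL, ih c (n + 1) (by omega)]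
      have hR : pvRuns (c :: c :: rest') = (c, m + 1) :: t := by
        rw [pvRuns, hmt]; simp
      rw [hR, hmt]
      have e1 : m + 1 + (n - 1) = m + n := by omega
      have e2 : n + 1 - 1 = n := by omega
      simp [pvBump, e1, e2]
    · have hR : pvRuns (c :: d :: rest') = (c, 1) :: (d, m) :: t := by
        rw [pvRuns, hmt]; simp [hcd]
      have hcd' : (c == d) = false := by simp [hcd]
      have h1 : 1 + (n - 1) = n := by omega
      have hIH := ih d 1 (by omega)
      rw [hmt] at hIH
      simp only [pvBump] at hIH
      by_cases h2 : n = 2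
      · subst h2
        simp [pvALoop, hcd', hR, pvBump]
      · have hs : (decide (n = 2)) = false := by simp [h2]
        have hL : pvALoop (c :: d :: rest') (decide (2 ≤ n)) (decide (n = 2)) =
            pvALoop (d :: rest') (decide (2 ≤ 1)) (decide ((1:Nat) = 2)) := by
          simp [pvALoop, hcd', hs]
        rw [hL, hIH, hR]
        simp [pvBump, h1, h2]

-- ===== VERDICT (by name: the statement is the Claim_ definition above) =====
theorem has_strict_double_spec : Claim_equal_has_strict_double := by
  intro s _
  unfold Spec_has_strict_double has_strict_double has_strict_double_alt
  cases h : s.toList with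
  | nil => simp [pvALoop, pvRuns]
  | cons c rest =>
    have := pvALoop_runs rest c 1 (by omega)
    simpa [pvBump] using this.trans (by
      obtain ⟨m, t, hmt⟩ := pvRuns_head c rest
      rw [hmt]; simp [pvBump])
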